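-- pv_equiv track=rewrite | github.com/anzapatab/portfolio-samples | energy-dashboard/security/password_policy.py | _normalize_password
-- ===== SOURCE A (Python) =====
-- def _normalize_password(password: str) -> str:
--     """
--     Normalize password by reversing common substitutions.
--
--     Converts: @ -> a, 0 -> o, 1 -> i, 3 -> e, $ -> s, etc.
--     """
--     substitutions = {
--         "@": "a",
--         "0": "o",
--         "1": "i",
--         "3": "e",
--         "$": "s",
--         "5": "s",
--         "7": "t",
--         "4": "a",
--         "!": "i",
--         "+": "t",
--     }
--     normalized = password.lower()
--     for char, replacement in substitutions.items():
--         normalized = normalized.replace(char, replacement)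
--     return normalized
-- ===== SOURCE B (Python) =====
-- def _normalize_password(password: str) -> str:
--     """Single pass: lowercase, then map each character through the substitution table."""
--     subs = {
--         "@": "a",
--         "0": "o",
--         "1": "i",
--         "3": "e",
--         "$": "s",
--         "5": "s",
--         "7": "t",
--         "4": "a",
--         "!": "i",
--         "+": "t",
--     }
--     return "".join(subs.get(c, c) for c in password.lower())
-- ===== Notes on version B (the rewrite author's own statement) =====
-- stated objective: idiomatic
-- what changed: A lowercases and then runs ten full-string replace passes (one per substitution); B lowercases once and builds the result in a single pass over the characters, looking each one up in the substitution dict with get(c, c).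
import Mathlib
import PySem

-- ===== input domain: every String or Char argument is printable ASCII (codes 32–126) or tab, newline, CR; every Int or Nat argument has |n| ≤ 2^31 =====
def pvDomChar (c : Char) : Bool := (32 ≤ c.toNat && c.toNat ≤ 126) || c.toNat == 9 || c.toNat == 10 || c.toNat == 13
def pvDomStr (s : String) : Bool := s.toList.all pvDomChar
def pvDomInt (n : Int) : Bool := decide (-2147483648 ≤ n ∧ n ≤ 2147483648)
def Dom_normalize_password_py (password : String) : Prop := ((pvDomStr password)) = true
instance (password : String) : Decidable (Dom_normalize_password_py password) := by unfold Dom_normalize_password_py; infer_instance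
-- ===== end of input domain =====

-- B replaces A's ten sequential full-string replace passes with a single per-character
-- dict-lookup pass over the lowercased input (objective: idiomatic; not measured faster).

-- ===== PORT A =====
-- A's substitution dict, as its insertion-ordered item list (keys are distinct).
def pvSubsA : List (String × String) :=
  [("@", "a"), ("0", "o"), ("1", "i"), ("3", "e"), ("$", "s"),
   ("5", "s"), ("7", "t"), ("4", "a"), ("!", "i"), ("+", "t")]

def normalize_password_py (password : String) : String :=
  let substitutions : PySem.Dict String String := PySem.Dict.ofList pvSubsA
  let normalized := PySem.Str.lower password
  substitutions.items.foldl (fun n p => PySem.Str.replace n p.1 p.2) normalized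

-- ===== PORT B =====
-- B's dict, keyed by the single characters (Python's 1-char strings).
def pvSubsB : PySem.Dict Char Char :=
  PySem.Dict.ofList
    [('@', 'a'), ('0', 'o'), ('1', 'i'), ('3', 'e'), ('$', 's'),
     ('5', 's'), ('7', 't'), ('4', 'a'), ('!', 'i'), ('+', 't')]

def normalize_password_py_alt (password : String) : String :=
  String.ofList ((PySem.Str.lower password).toList.map (fun c => pvSubsB.getD c c))

-- ===== PRECONDITION & SPEC =====
def Spec_normalize_password_py (password : String) (out : String) : Prop := out = normalize_password_py_alt password
instance (password : String) (out : String) : Decidable (Spec_normalize_password_py password out) := by unfold Spec_normalize_password_py; infer_instance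

-- ===== CLAIM (what is proved, stated in full; the proofs are below) =====
def Claim_equal_normalize_password_py : Prop := ∀ (password : String), Dom_normalize_password_py password → Spec_normalize_password_py password (normalize_password_py password)

-- ===== LEMMAS AND PROOFS =====

-- one of A's passes, seen per character
def pvStep (c r x : Char) : Char := if x = c then r else x

theorem pvSubsA_items : (PySem.Dict.ofList pvSubsA).items = pvSubsA := by decide

theorem pvSubsB_items :
    pvSubsB.items = [('@', 'a'), ('0', 'o'), ('1', 'i'), ('3', 'e'), ('$', 's'),
      ('5', 's'), ('7', 't'), ('4', 'a'), ('!', 'i'), ('+', 't')] := by decide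

-- Single-character str.replace is a character map.
theorem replace_go_single (c r : Char) :
    ∀ (fuel : Nat) (s acc : List Char), s.length ≤ fuel →
      PySem.Chars.replace.go [c] [r] fuel s acc
        = acc.reverse ++ s.map (pvStep c r) := by
  intro fuel
  induction fuel with
  | zero =>
    intro s acc h
    have : s = [] := List.eq_nil_of_length_eq_zero (Nat.le_zero.mp h)
    subst this
    simp [PySem.Chars.replace.go]
  | succ n ih =>
    intro s acc h
    cases s with
    | nil => simp [PySem.Chars.replace.go]
    | cons x t =>
      by_cases hx : x = c
      · subst hx
        have hpre : List.isPrefixOf [x] (x :: t) = true := by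
          simp [List.isPrefixOf]
        simp only [PySem.Chars.replace.go, hpre, if_pos]
        rw [show List.drop [x].length (x :: t) = t from rfl]
        rw [ih t _ (by simpa using h)]
        simp [pvStep]
      · have hpre : ¬ List.isPrefixOf [c] (x :: t) = true := by
          simp [List.isPrefixOf]
          intro hc; exact hx hc.symm
        simp only [PySem.Chars.replace.go]
        rw [if_neg hpre]
        rw [ih t _ (by simpa using h)]
        simp [pvStep, hx]

theorem replace_single (c r : Char) (s : List Char) :
    PySem.Chars.replace s [c] [r] = s.map (pvStep c r) := by
  rw [PySem.Chars.replace]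
  simp only [List.isEmpty_cons, Bool.false_eq_true, if_false]
  exact replace_go_single c r s.length s [] le_rfl

-- The composition of A's ten character substitutions equals B's single dict lookup.
theorem composed_eq_getD (x : Char) :
    pvStep '+' 't' (pvStep '!' 'i' (pvStep '4' 'a' (pvStep '7' 't' (pvStep '5' 's'
      (pvStep '$' 's' (pvStep '3' 'e' (pvStep '1' 'i' (pvStep '0' 'o'
        (pvStep '@' 'a' x))))))))) = pvSubsB.getD x x := by
  by_cases h1 : x = '@';  · subst h1; decide
  by_cases h2 : x = '0';  · subst h2; decide
  by_cases h3 : x = '1';  · subst h3; decide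
  by_cases h4 : x = '3';  · subst h4; decide
  by_cases h5 : x = '$';  · subst h5; decide
  by_cases h6 : x = '5';  · subst h6; decide
  by_cases h7 : x = '7';  · subst h7; decide
  by_cases h8 : x = '4';  · subst h8; decide
  by_cases h9 : x = '!';  · subst h9; decide
  by_cases h10 : x = '+'; · subst h10; decide
  have e1 : ('@' == x) = false := by simp [Ne.symm h1]
  have e2 : ('0' == x) = false := by simp [Ne.symm h2]
  have e3 : ('1' == x) = false := by simp [Ne.symm h3]
  have e4 : ('3' == x) = false := by simp [Ne.symm h4]
  have e5 : ('$' == x) = false := by simp [Ne.symm h5]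
  have e6 : ('5' == x) = false := by simp [Ne.symm h6]
  have e7 : ('7' == x) = false := by simp [Ne.symm h7]
  have e8 : ('4' == x) = false := by simp [Ne.symm h8]
  have e9 : ('!' == x) = false := by simp [Ne.symm h9]
  have e10 : ('+' == x) = false := by simp [Ne.symm h10]
  simp [pvStep, h1, h2, h3, h4, h5, h6, h7, h8, h9, h10,
    PySem.Dict.getD, PySem.Dict.get?, pvSubsB_items, List.find?,
    e1, e2, e3, e4, e5, e6, e7, e8, e9, e10]

-- ===== VERDICT (by name: the statement is the Claim_ definition above) =====
theorem normalize_password_py_spec : Claim_equal_normalize_password_py := by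
  intro password _
  unfold Spec_normalize_password_py normalize_password_py normalize_password_py_alt
  apply String.toList_inj.mp
  dsimp only
  rw [pvSubsA_items]
  simp only [pvSubsA, List.foldl_cons, List.foldl_nil]
  simp only [PySem.Str.toList_replace, String.toList_ofList]
  simp only [show ("@" : String).toList = ['@'] from rfl,
    show ("a" : String).toList = ['a'] from rfl,
    show ("0" : String).toList = ['0'] from rfl,
    show ("o" : String).toList = ['o'] from rfl,
    show ("1" : String).toList = ['1'] from rfl,
    show ("i" : String).toList = ['i'] from rfl,
    show ("3" : String).toList = ['3'] from rfl,
    show ("e" : String).toList = ['e'] from rfl,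
    show ("$" : String).toList = ['$'] from rfl,
    show ("s" : String).toList = ['s'] from rfl,
    show ("5" : String).toList = ['5'] from rfl,
    show ("7" : String).toList = ['7'] from rfl,
    show ("t" : String).toList = ['t'] from rfl,
    show ("4" : String).toList = ['4'] from rfl,
    show ("!" : String).toList = ['!'] from rfl,
    show ("+" : String).toList = ['+'] from rfl]
  simp only [replace_single, List.map_map]
  simp only [Function.comp_def]
  apply List.map_congr_left
  intro x _
  exact composed_eq_getD x
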